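-- pv_equiv track=rewrite | github.com/FedericoAureliano/eudoxus | examples/dfy/py_src/ex_290.py | find_max_length_lists
-- ===== SOURCE A (Python) =====
-- def find_max_length_lists(lists):
--     # Initialize variables to keep track of the max length and corresponding lists
--     max_length = -1
--     max_length_lists = []
--
--     i = 0
--     # Loop through each list
--     while i < len(lists):
--         sublist = lists[i]
--         # Check if the current sublist's length is greater than the known max length
--         if len(sublist) > max_length:
--             max_length = len(sublist)
--             # If a new max length is found, reset the list of max length lists
--             max_length_lists = [sublist]
--         elif len(sublist) == max_length:
--             # If the current sublist's length matches the known max length, add it to our list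
--             max_length_lists.append(sublist)
--         i += 1
--
--     return max_length_lists
-- ===== SOURCE B (Python) =====
-- def find_max_length_lists(lists):
--     if not lists:
--         return []
--     m = max(len(s) for s in lists)
--     return [s for s in lists if len(s) == m]
-- ===== Notes on version B (the rewrite author's own statement) =====
-- stated objective: simpler
-- what changed: Replaces A's single-pass running-max with reset/append accumulation by a two-pass compute-max-then-filter decomposition (empty input handled explicitly).
import Mathlib
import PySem

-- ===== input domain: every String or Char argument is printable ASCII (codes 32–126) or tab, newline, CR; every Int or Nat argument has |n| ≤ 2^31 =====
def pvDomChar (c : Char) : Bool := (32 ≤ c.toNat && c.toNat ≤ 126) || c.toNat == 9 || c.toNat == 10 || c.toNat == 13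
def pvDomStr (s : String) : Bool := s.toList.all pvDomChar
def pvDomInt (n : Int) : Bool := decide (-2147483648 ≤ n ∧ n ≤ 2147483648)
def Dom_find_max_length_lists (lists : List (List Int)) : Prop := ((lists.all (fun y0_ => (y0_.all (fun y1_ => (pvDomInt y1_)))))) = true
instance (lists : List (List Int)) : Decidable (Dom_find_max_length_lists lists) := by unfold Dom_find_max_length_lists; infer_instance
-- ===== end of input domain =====

-- B replaces A's single-pass running-max-with-reset accumulation by a compute-the-maximum-then-filter decomposition (objective: simpler); both total, same return value.

-- ===== PORT A =====
-- A's while loop over indices, carried as a fold over the list with state (max_length, max_length_lists).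
def pvStepA (st : Int × List (List Int)) (sublist : List Int) : Int × List (List Int) :=
  if (sublist.length : Int) > st.1 then ((sublist.length : Int), [sublist])
  else if (sublist.length : Int) = st.1 then (st.1, st.2 ++ [sublist])
  else st

def find_max_length_lists (lists : List (List Int)) : List (List Int) :=
  (lists.foldl pvStepA ((-1 : Int), [])).2

-- ===== PORT B =====
def find_max_length_lists_alt (lists : List (List Int)) : List (List Int) :=
  match lists with
  | [] => []
  | x :: xs =>
    let m : Nat := (xs.map List.length).foldl Nat.max x.length  -- max(len(s) for s in lists)
    lists.filter (fun s => s.length == m)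

-- ===== PRECONDITION & SPEC =====
def Spec_find_max_length_lists (lists : List (List Int)) (out : List (List Int)) : Prop := out = find_max_length_lists_alt lists
instance (lists : List (List Int)) (out : List (List Int)) : Decidable (Spec_find_max_length_lists lists out) := by unfold Spec_find_max_length_lists; infer_instance

-- ===== CLAIM (what is proved, stated in full; the proofs are below) =====
def Claim_equal_find_max_length_lists : Prop := ∀ (lists : List (List Int)), Dom_find_max_length_lists lists → Spec_find_max_length_lists lists (find_max_length_lists lists)

-- ===== LEMMAS AND PROOFS =====

-- the running max never decreases below its starting value
lemma pvLeFoldlMax (ls : List (List Int)) : ∀ (a : Int), a ≤ ls.foldl (fun a s => max a (s.length : Int)) a := by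
  induction ls with
  | nil => simp
  | cons t rt iht =>
    intro a
    simp only [List.foldl_cons]
    exact le_trans (le_max_left a ((t.length : Nat) : Int)) (iht (max a ((t.length : Nat) : Int)))

-- invariant for A's fold: starting from (m, acc), the accumulator of the result is
-- acc (kept iff the final max equals m) followed by the elements of ls of maximal length
lemma pvKey (ls : List (List Int)) (m : Int) (acc : List (List Int)) :
    (ls.foldl pvStepA (m, acc)).2 =
      (if ls.foldl (fun a s => max a (s.length : Int)) m = m then acc else []) ++
        ls.filter (fun s => (s.length : Int) == ls.foldl (fun a s => max a (s.length : Int)) m) := by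
  induction ls generalizing m acc with
  | nil => simp
  | cons s rest ih =>
    have hmax := pvLeFoldlMax rest
    simp only [List.foldl_cons, pvStepA]
    by_cases h1 : (s.length : Int) > m
    · rw [if_pos h1, ih]
      have hM : max m (s.length : Int) = (s.length : Int) := by omega
      simp only [hM]
      have hMge : (s.length : Int) ≤ rest.foldl (fun a s => max a (s.length : Int)) (s.length : Int) := hmax _
      by_cases h2 : rest.foldl (fun a s => max a (s.length : Int)) (s.length : Int) = (s.length : Int)
      · rw [if_pos h2, if_neg (by omega)]
        simp [h2]
      · rw [if_neg h2, if_neg (by omega)]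
        have : ((s.length : Int) == rest.foldl (fun a s => max a (s.length : Int)) (s.length : Int)) = false := by
          simp; omega
        simp [this]
    · by_cases h2 : (s.length : Int) = m
      · rw [if_neg h1, if_pos h2, ih]
        have hM : max m (s.length : Int) = m := by omega
        simp only [hM]
        have hMge : m ≤ rest.foldl (fun a s => max a (s.length : Int)) m := hmax _
        by_cases h3 : rest.foldl (fun a s => max a (s.length : Int)) m = m
        · rw [if_pos h3, if_pos h3]
          have : ((s.length : Int) == rest.foldl (fun a s => max a (s.length : Int)) m) = true := by
            simp; omega
          simp [this]
        · rw [if_neg h3, if_neg h3]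
          have : ((s.length : Int) == rest.foldl (fun a s => max a (s.length : Int)) m) = false := by
            simp; omega
          simp [this]
      · rw [if_neg h1, if_neg h2, ih]
        have hM : max m (s.length : Int) = m := by omega
        simp only [hM]
        have hMge : m ≤ rest.foldl (fun a s => max a (s.length : Int)) m := hmax _
        have : ((s.length : Int) == rest.foldl (fun a s => max a (s.length : Int)) m) = false := by
          simp; omega
        simp [this]

-- A's Int running max over x :: xs, started at -1, equals B's Nat max (cast to Int)
lemma pvMaxCast (ls : List (List Int)) (n : Nat) :
    ls.foldl (fun a s => max a (s.length : Int)) (n : Int) =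
      (((ls.map List.length).foldl Nat.max n : Nat) : Int) := by
  induction ls generalizing n with
  | nil => simp
  | cons s rest ih =>
    simp only [List.foldl_cons, List.map_cons]
    rw [show max (n : Int) (s.length : Int) = ((Nat.max n s.length : Nat) : Int) by push_cast; rfl]
    exact ih _

-- ===== VERDICT (by name: the statement is the Claim_ definition above) =====
theorem find_max_length_lists_spec : Claim_equal_find_max_length_lists := by
  intro lists _
  unfold Spec_find_max_length_lists find_max_length_lists find_max_length_lists_alt
  match lists with
  | [] => rfl
  | x :: xs =>
    simp only
    rw [pvKey]
    have hstep : ((x :: xs).foldl (fun a s => max a (s.length : Int)) (-1 : Int)) =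
        xs.foldl (fun a s => max a (s.length : Int)) ((x.length : Nat) : Int) := by
      simp only [List.foldl_cons]
      congr 1
    rw [hstep, pvMaxCast]
    have hne : (((xs.map List.length).foldl Nat.max x.length : Nat) : Int) ≠ (-1 : Int) := by
      have : (0 : Int) ≤ (((xs.map List.length).foldl Nat.max x.length : Nat) : Int) := Int.natCast_nonneg _
      omega
    rw [if_neg hne]
    simp only [List.nil_append]
    apply List.filter_congr
    intro s _
    simp
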